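-- pv_equiv track=rewrite | github.com/POBSIZ/JANGGI_DOT_COM | janggi/board.py | are_on_same_palace_diagonal_line
-- ===== SOURCE A (Python) =====
-- def are_on_same_palace_diagonal_line(from_file: int, from_rank: int, to_file: int, to_rank: int) -> bool:
--     """Check if two positions are on the same palace diagonal line.
--
--     Palace X-diagonals:
--     - HAN Line1: (3,0) - (4,1) - (5,2)  [bottom-left to top-right]
--     - HAN Line2: (5,0) - (4,1) - (3,2)  [bottom-right to top-left]
--     - CHO Line1: (3,7) - (4,8) - (5,9)  [bottom-left to top-right]
--     - CHO Line2: (5,7) - (4,8) - (3,9)  [bottom-right to top-left]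
--
--     For a valid diagonal move in palace, both positions must be on the same diagonal line.
--     """
--     # Define the diagonal lines
--     han_line1 = {(3, 0), (4, 1), (5, 2)}  # bottom-left to top-right
--     han_line2 = {(5, 0), (4, 1), (3, 2)}  # bottom-right to top-left
--     cho_line1 = {(3, 7), (4, 8), (5, 9)}  # bottom-left to top-right
--     cho_line2 = {(5, 7), (4, 8), (3, 9)}  # bottom-right to top-left
--
--     from_pos = (from_file, from_rank)
--     to_pos = (to_file, to_rank)
--
--     # Check if both positions are on the same diagonal line
--     for line in [han_line1, han_line2, cho_line1, cho_line2]: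
--         if from_pos in line and to_pos in line:
--             return True
--
--     return False
-- ===== SOURCE B (Python) =====
-- def are_on_same_palace_diagonal_line(from_file: int, from_rank: int, to_file: int, to_rank: int) -> bool:
--     """Closed-form geometric check: both points must lie in the same palace
--     (files 3-5, ranks 0-2 for HAN or 7-9 for CHO) and share a diagonal
--     invariant: equal file-rank on the rising diagonal, or equal file+rank on
--     the falling diagonal, matching that palace's two X-lines."""
--     for base in (0, 7):
--         if (3 <= from_file <= 5 and base <= from_rank <= base + 2
--                 and 3 <= to_file <= 5 and base <= to_rank <= base + 2):
--             rising = 3 - base          # file - rank on the bottom-left -> top-right line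
--             falling = 5 + base     # file + rank on the bottom-right -> top-left line
--             return ((from_file - from_rank == rising and to_file - to_rank == rising)
--                     or (from_file + from_rank == falling and to_file + to_rank == falling))
--     return False
-- ===== Notes on version B (the rewrite author's own statement) =====
-- stated objective: simpler
-- what changed: Replaced the scan over four hard-coded 3-point diagonal sets with a closed-form geometric check: both points must lie in the same palace box (files 3-5, ranks 0-2 or 7-9) and share that palace's rising (file-rank) or falling (file+rank) diagonal invariant.
import Mathlib
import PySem

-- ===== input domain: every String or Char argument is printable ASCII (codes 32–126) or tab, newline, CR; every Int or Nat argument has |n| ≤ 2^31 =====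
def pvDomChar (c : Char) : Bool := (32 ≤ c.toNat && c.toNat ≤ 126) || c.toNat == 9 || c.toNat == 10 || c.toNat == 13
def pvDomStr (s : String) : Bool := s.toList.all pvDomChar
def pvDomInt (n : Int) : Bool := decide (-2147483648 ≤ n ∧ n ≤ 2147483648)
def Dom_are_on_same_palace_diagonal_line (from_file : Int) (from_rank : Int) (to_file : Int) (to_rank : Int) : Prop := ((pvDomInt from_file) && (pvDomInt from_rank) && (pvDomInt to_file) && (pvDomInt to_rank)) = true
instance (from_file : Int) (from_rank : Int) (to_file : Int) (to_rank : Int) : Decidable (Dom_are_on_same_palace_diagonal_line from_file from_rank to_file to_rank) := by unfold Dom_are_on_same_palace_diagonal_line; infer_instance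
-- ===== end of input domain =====

-- B replaces A's scan over four literal point-sets with a closed-form palace/diagonal-invariant check (objective: simpler).
-- ===== PORT A =====
def pvHanLine1 : PySem.Set (Int × Int) := PySem.Set.ofList [(3, 0), (4, 1), (5, 2)]
def pvHanLine2 : PySem.Set (Int × Int) := PySem.Set.ofList [(5, 0), (4, 1), (3, 2)]
def pvChoLine1 : PySem.Set (Int × Int) := PySem.Set.ofList [(3, 7), (4, 8), (5, 9)]
def pvChoLine2 : PySem.Set (Int × Int) := PySem.Set.ofList [(5, 7), (4, 8), (3, 9)]

-- the 'for line in [...]' loop with its early 'return True'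
def pvLineScan : List (PySem.Set (Int × Int)) → (Int × Int) → (Int × Int) → Bool
  | [], _, _ => false
  | line :: rest, from_pos, to_pos =>
    if PySem.Set.contains line from_pos && PySem.Set.contains line to_pos then true
    else pvLineScan rest from_pos to_pos

def are_on_same_palace_diagonal_line (from_file : Int) (from_rank : Int) (to_file : Int) (to_rank : Int) : Bool :=
  pvLineScan [pvHanLine1, pvHanLine2, pvChoLine1, pvChoLine2] (from_file, from_rank) (to_file, to_rank)

-- ===== PORT B =====
-- the 'for base in (0, 7)' loop with its early 'return'
def pvPalaceScan : List Int → Int → Int → Int → Int → Bool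
  | [], _, _, _, _ => false
  | base :: rest, ff, fr, tf, tr =>
    if 3 ≤ ff ∧ ff ≤ 5 ∧ base ≤ fr ∧ fr ≤ base + 2 ∧ 3 ≤ tf ∧ tf ≤ 5 ∧ base ≤ tr ∧ tr ≤ base + 2 then
      let rising := 3 - base
      let falling := 5 + base
      decide ((ff - fr = rising ∧ tf - tr = rising) ∨ (ff + fr = falling ∧ tf + tr = falling))
    else pvPalaceScan rest ff fr tf tr

def are_on_same_palace_diagonal_line_alt (from_file : Int) (from_rank : Int) (to_file : Int) (to_rank : Int) : Bool :=
  pvPalaceScan [0, 7] from_file from_rank to_file to_rank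

-- ===== PRECONDITION & SPEC =====
def Spec_are_on_same_palace_diagonal_line (from_file : Int) (from_rank : Int) (to_file : Int) (to_rank : Int) (out : Bool) : Prop := out = are_on_same_palace_diagonal_line_alt from_file from_rank to_file to_rank
instance (from_file : Int) (from_rank : Int) (to_file : Int) (to_rank : Int) (out : Bool) : Decidable (Spec_are_on_same_palace_diagonal_line from_file from_rank to_file to_rank out) := by unfold Spec_are_on_same_palace_diagonal_line; infer_instance

-- ===== CLAIM (what is proved, stated in full; the proofs are below) =====
def Claim_equal_are_on_same_palace_diagonal_line : Prop := ∀ (from_file : Int) (from_rank : Int) (to_file : Int) (to_rank : Int), Dom_are_on_same_palace_diagonal_line from_file from_rank to_file to_rank → Spec_are_on_same_palace_diagonal_line from_file from_rank to_file to_rank (are_on_same_palace_diagonal_line from_file from_rank to_file to_rank)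

-- ===== LEMMAS AND PROOFS =====
theorem pv_mem_han1 (f r : Int) : PySem.Set.contains pvHanLine1 (f, r) = true ↔ (f = 3 ∧ r = 0) ∨ (f = 4 ∧ r = 1) ∨ (f = 5 ∧ r = 2) := by
  simp [pvHanLine1, PySem.Set.contains, PySem.Set.ofList, PySem.Set.add, Prod.ext_iff]

theorem pv_mem_han2 (f r : Int) : PySem.Set.contains pvHanLine2 (f, r) = true ↔ (f = 5 ∧ r = 0) ∨ (f = 4 ∧ r = 1) ∨ (f = 3 ∧ r = 2) := by
  simp [pvHanLine2, PySem.Set.contains, PySem.Set.ofList, PySem.Set.add, Prod.ext_iff]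

theorem pv_mem_cho1 (f r : Int) : PySem.Set.contains pvChoLine1 (f, r) = true ↔ (f = 3 ∧ r = 7) ∨ (f = 4 ∧ r = 8) ∨ (f = 5 ∧ r = 9) := by
  simp [pvChoLine1, PySem.Set.contains, PySem.Set.ofList, PySem.Set.add, Prod.ext_iff]

theorem pv_mem_cho2 (f r : Int) : PySem.Set.contains pvChoLine2 (f, r) = true ↔ (f = 5 ∧ r = 7) ∨ (f = 4 ∧ r = 8) ∨ (f = 3 ∧ r = 9) := by
  simp [pvChoLine2, PySem.Set.contains, PySem.Set.ofList, PySem.Set.add, Prod.ext_iff]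

-- ===== VERDICT (by name: the statement is the Claim_ definition above) =====
theorem are_on_same_palace_diagonal_line_spec : Claim_equal_are_on_same_palace_diagonal_line := by
  intro ff fr tf tr _
  unfold Spec_are_on_same_palace_diagonal_line
  rw [Bool.eq_iff_iff]
  simp only [are_on_same_palace_diagonal_line, are_on_same_palace_diagonal_line_alt,
    pvLineScan, pvPalaceScan, Bool.ite_eq_true_distrib, if_true_left, Bool.and_eq_true,
    pv_mem_han1, pv_mem_han2, pv_mem_cho1, pv_mem_cho2, decide_eq_true_eq, Bool.false_eq_true]
  split_ifs with h0 h7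
  · constructor
    · intro hc
      by_contra hR
      rw [not_or] at hR
      obtain ⟨hr1, hr2⟩ := hR
      refine hc ?_ ?_ ?_ ?_
      · rintro ⟨⟨e1, e2⟩ | ⟨e1, e2⟩ | ⟨e1, e2⟩, ⟨e3, e4⟩ | ⟨e3, e4⟩ | ⟨e3, e4⟩⟩ <;>
          exact hr1 ⟨by omega, by omega⟩
      · rintro ⟨⟨e1, e2⟩ | ⟨e1, e2⟩ | ⟨e1, e2⟩, ⟨e3, e4⟩ | ⟨e3, e4⟩ | ⟨e3, e4⟩⟩ <;>
          exact hr2 ⟨by omega, by omega⟩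
      · rintro ⟨⟨e1, e2⟩ | ⟨e1, e2⟩ | ⟨e1, e2⟩, _⟩ <;> omega
      · rintro ⟨⟨e1, e2⟩ | ⟨e1, e2⟩ | ⟨e1, e2⟩, _⟩ <;> omega
    · rintro (⟨d1, d2⟩ | ⟨s1, s2⟩) h1 h2 h3 h4
      · exact h1 ⟨by omega, by omega⟩
      · exact h2 ⟨by omega, by omega⟩
  · constructor
    · intro hc
      by_contra hR
      rw [not_or] at hR
      obtain ⟨hr1, hr2⟩ := hR
      refine hc ?_ ?_ ?_ ?_
      · rintro ⟨⟨e1, e2⟩ | ⟨e1, e2⟩ | ⟨e1, e2⟩, _⟩ <;> omega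
      · rintro ⟨⟨e1, e2⟩ | ⟨e1, e2⟩ | ⟨e1, e2⟩, _⟩ <;> omega
      · rintro ⟨⟨e1, e2⟩ | ⟨e1, e2⟩ | ⟨e1, e2⟩, ⟨e3, e4⟩ | ⟨e3, e4⟩ | ⟨e3, e4⟩⟩ <;>
          exact hr1 ⟨by omega, by omega⟩
      · rintro ⟨⟨e1, e2⟩ | ⟨e1, e2⟩ | ⟨e1, e2⟩, ⟨e3, e4⟩ | ⟨e3, e4⟩ | ⟨e3, e4⟩⟩ <;>
          exact hr2 ⟨by omega, by omega⟩
    · rintro (⟨d1, d2⟩ | ⟨s1, s2⟩) h1 h2 h3 h4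
      · exact h3 ⟨by omega, by omega⟩
      · exact h4 ⟨by omega, by omega⟩
  · constructor
    · intro hc
      refine hc ?_ ?_ ?_ ?_ <;>
        (rintro ⟨⟨e1, e2⟩ | ⟨e1, e2⟩ | ⟨e1, e2⟩, _⟩ <;> omega)
    · exact fun h => h.elim
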